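-- pv_equiv track=rewrite | github.com/KayWP/JatsToMarkdownConverter | V2/Artikelen/Charterbank/apply_bmgn_style.py | style_replace
-- ===== SOURCE A (Python) =====
-- def style_replace(htmlfile):
--     replace_dictionary = {'--jp-content-heading-font-weight: 500;':'--jp-content-heading-font-weight: bold;',
--                          '--jp-content-font-size1: 14px;':'--jp-content-font-size1: 13px;',
--                          '--jp-content-font-size3: 1.44em;':'--jp-content-font-size3: 13px;',
--                          '--jp-content-font-size4: 1.728em;':'--jp-content-font-size4: 14px;',
--                          '--jp-content-font-size5: 2.0736em;':'--jp-content-font-size5: 18px;'}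
--     output = htmlfile
--     for replacement in replace_dictionary.keys():
--         output = output.replace(replacement, replace_dictionary[replacement])
--
--     return output
-- ===== SOURCE B (Python) =====
-- def style_replace(htmlfile):
--     table = {'--jp-content-heading-font-weight: 500;': '--jp-content-heading-font-weight: bold;',
--              '--jp-content-font-size1: 14px;': '--jp-content-font-size1: 13px;',
--              '--jp-content-font-size3: 1.44em;': '--jp-content-font-size3: 13px;',
--              '--jp-content-font-size4: 1.728em;': '--jp-content-font-size4: 14px;',
--              '--jp-content-font-size5: 2.0736em;': '--jp-content-font-size5: 18px;'}
--     pieces = []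
--     i, n = 0, len(htmlfile)
--     while i < n:
--         for src, dst in table.items():
--             if htmlfile.startswith(src, i):
--                 pieces.append(dst)
--                 i += len(src)
--                 break
--         else:
--             pieces.append(htmlfile[i])
--             i += 1
--     return ''.join(pieces)
-- ===== Notes on version B (the rewrite author's own statement) =====
-- stated objective: alternative
-- what changed: Replaces five sequential full-string str.replace passes with a single left-to-right scan that at each position dispatches the first matching key of the table and emits its replacement.
import Mathlib
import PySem

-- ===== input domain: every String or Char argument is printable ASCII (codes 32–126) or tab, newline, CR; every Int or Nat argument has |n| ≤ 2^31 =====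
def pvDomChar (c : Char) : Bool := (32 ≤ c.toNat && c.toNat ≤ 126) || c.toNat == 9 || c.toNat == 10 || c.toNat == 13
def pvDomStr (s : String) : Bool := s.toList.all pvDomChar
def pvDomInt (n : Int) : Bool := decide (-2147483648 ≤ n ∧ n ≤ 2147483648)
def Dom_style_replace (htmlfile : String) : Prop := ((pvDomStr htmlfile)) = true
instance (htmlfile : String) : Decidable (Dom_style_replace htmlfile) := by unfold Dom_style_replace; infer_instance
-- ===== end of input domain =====

-- B replaces A's five sequential full-string replace passes by one left-to-right scan
-- dispatching each position through the key table (objective: alternative).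


-- ===== PORT A =====
-- the dict literal of A
def pvDictA : PySem.Dict String String := PySem.Dict.ofList
  [("--jp-content-heading-font-weight: 500;", "--jp-content-heading-font-weight: bold;"),
   ("--jp-content-font-size1: 14px;", "--jp-content-font-size1: 13px;"),
   ("--jp-content-font-size3: 1.44em;", "--jp-content-font-size3: 13px;"),
   ("--jp-content-font-size4: 1.728em;", "--jp-content-font-size4: 14px;"),
   ("--jp-content-font-size5: 2.0736em;", "--jp-content-font-size5: 18px;")]

-- 'for replacement in replace_dictionary.keys(): output = output.replace(...)';
-- replace_dictionary[replacement] never raises (replacement is a key), ported as getD with unused default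
def style_replace (htmlfile : String) : String :=
  pvDictA.keys.foldl
    (fun output replacement => PySem.Str.replace output replacement (pvDictA.getD replacement ""))
    htmlfile

-- ===== PORT B =====
-- the same table, as (source, replacement) char-list pairs in dict order
def pvPairs : List (List Char × List Char) :=
  [("--jp-content-heading-font-weight: 500;".toList, "--jp-content-heading-font-weight: bold;".toList),
   ("--jp-content-font-size1: 14px;".toList, "--jp-content-font-size1: 13px;".toList),
   ("--jp-content-font-size3: 1.44em;".toList, "--jp-content-font-size3: 13px;".toList),
   ("--jp-content-font-size4: 1.728em;".toList, "--jp-content-font-size4: 14px;".toList),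
   ("--jp-content-font-size5: 2.0736em;".toList, "--jp-content-font-size5: 18px;".toList)]

-- the inner 'for src, dst in table.items(): if htmlfile.startswith(src, i)' loop:
-- first pair whose source is a prefix of the remaining input, with the rest after it
def pvTry (pairs : List (List Char × List Char)) (s : List Char) :
    Option (List Char × List Char) :=
  match pairs with
  | [] => none
  | (k, v) :: rest => if k.isPrefixOf s then some (v, List.drop k.length s) else pvTry rest s

-- the 'while i < n' loop over the remaining input (fuel = an upper bound on the
-- number of iterations; each iteration consumes at least one character)
def pvScan (pairs : List (List Char × List Char)) : Nat → List Char → List Char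
  | 0, _ => []
  | _ + 1, [] => []
  | fuel + 1, c :: t =>
    match pvTry pairs (c :: t) with
    | some (v, rest) => v ++ pvScan pairs fuel rest
    | none => c :: pvScan pairs fuel t

def style_replace_alt (htmlfile : String) : String :=
  String.ofList (pvScan pvPairs htmlfile.toList.length htmlfile.toList)

-- ===== PRECONDITION & SPEC =====
def Spec_style_replace (htmlfile : String) (out : String) : Prop := out = style_replace_alt htmlfile
instance (htmlfile : String) (out : String) : Decidable (Spec_style_replace htmlfile out) := by unfold Spec_style_replace; infer_instance

-- ===== CLAIM (what is proved, stated in full; the proofs are below) =====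
def Claim_equal_style_replace : Prop := ∀ (htmlfile : String), Dom_style_replace htmlfile → Spec_style_replace htmlfile (style_replace htmlfile)

-- ===== LEMMAS AND PROOFS =====

-- A's composition of replace passes, at the char-list level
def pvSeqRep (P : List (List Char × List Char)) (s : List Char) : List Char :=
  P.foldl (fun out kv => PySem.Chars.replace out kv.1 kv.2) s

-- 'a and b are everywhere incomparable': no nonempty suffix of a is prefix-comparable with b
def pvInc (a b : List Char) : Prop :=
  ∀ p, p < a.length → ¬ (b <+: List.drop p a) ∧ ¬ (List.drop p a <+: b)

def pvIncB (a b : List Char) : Bool :=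
  (List.range a.length).all
    (fun p => !(b.isPrefixOf (List.drop p a)) && !((List.drop p a).isPrefixOf b))

theorem pvIncB_sound {a b : List Char} (h : pvIncB a b = true) : pvInc a b := by
  intro p hp
  have := (List.all_eq_true.mp h) p (List.mem_range.mpr hp)
  simp only [Bool.and_eq_true, Bool.not_eq_true'] at this
  constructor
  · intro hc; rw [← List.isPrefixOf_iff_prefix (l₁ := b)] at hc; simp [hc] at this
  · intro hc; rw [← List.isPrefixOf_iff_prefix] at hc; simp [hc] at this

-- definitional equations of the library's replace.go worker
theorem pv_go_zero (k v l acc : List Char) :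
    PySem.Chars.replace.go k v 0 l acc = acc.reverse ++ l := rfl

theorem pv_go_succ_nil (k v acc : List Char) (n : Nat) :
    PySem.Chars.replace.go k v (n + 1) [] acc = acc.reverse := rfl

theorem pv_go_succ_cons (k v t acc : List Char) (n : Nat) (c : Char) :
    PySem.Chars.replace.go k v (n + 1) (c :: t) acc =
      if k.isPrefixOf (c :: t) then
        PySem.Chars.replace.go k v n (List.drop k.length (c :: t)) (v.reverse ++ acc)
      else PySem.Chars.replace.go k v n t (c :: acc) := rfl

theorem pv_rep_go (s k v : List Char) (hk : k ≠ []) :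
    PySem.Chars.replace s k v = PySem.Chars.replace.go k v s.length s [] := by
  rw [PySem.Chars.replace]
  simp [List.isEmpty_iff, hk]

theorem pv_go_acc (k v : List Char) :
    ∀ (fuel : Nat) (l acc : List Char),
      PySem.Chars.replace.go k v fuel l acc = acc.reverse ++ PySem.Chars.replace.go k v fuel l [] := by
  intro fuel
  induction fuel with
  | zero => intro l acc; rw [pv_go_zero, pv_go_zero]; simp
  | succ n ih =>
    intro l acc
    cases l with
    | nil => rw [pv_go_succ_nil, pv_go_succ_nil]; simp
    | cons c t =>
      rw [pv_go_succ_cons, pv_go_succ_cons]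
      by_cases h : k.isPrefixOf (c :: t)
      · simp only [h, if_true]
        rw [ih _ (v.reverse ++ acc), ih _ (v.reverse ++ [])]
        simp
      · simp only [h, Bool.false_eq_true, if_false]
        rw [ih t (c :: acc), ih t [c]]
        simp

theorem pv_go_fuel (k v : List Char) (hk : k ≠ []) :
    ∀ (f₁ f₂ : Nat) (l acc : List Char), l.length ≤ f₁ → l.length ≤ f₂ →
      PySem.Chars.replace.go k v f₁ l acc = PySem.Chars.replace.go k v f₂ l acc := by
  intro f₁
  induction f₁ with
  | zero =>
    intro f₂ l acc h1 _
    have : l = [] := List.eq_nil_of_length_eq_zero (Nat.le_zero.mp h1)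
    subst this
    cases f₂ with
    | zero => rfl
    | succ m => rw [pv_go_zero, pv_go_succ_nil]; simp
  | succ n ih =>
    intro f₂ l acc h1 h2
    cases l with
    | nil =>
      cases f₂ with
      | zero => rw [pv_go_zero, pv_go_succ_nil]; simp
      | succ m => rfl
    | cons c t =>
      obtain ⟨m, rfl⟩ : ∃ m, f₂ = m + 1 := by
        cases f₂ with
        | zero => simp at h2
        | succ m => exact ⟨m, rfl⟩
      rw [pv_go_succ_cons, pv_go_succ_cons]
      have hklen : 1 ≤ k.length := by
        cases k with
        | nil => exact absurd rfl hk
        | cons _ _ => simp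
      by_cases h : k.isPrefixOf (c :: t)
      · simp only [h, if_true]
        apply ih
        · rw [List.length_drop]; simp only [List.length_cons] at h1 ⊢; omega
        · rw [List.length_drop]; simp only [List.length_cons] at h2 ⊢; omega
      · simp only [h, Bool.false_eq_true, if_false]
        apply ih <;> simp only [List.length_cons] at h1 h2 <;> omega

theorem pv_rep_nil (k v : List Char) (hk : k ≠ []) : PySem.Chars.replace [] k v = [] := by
  rw [pv_rep_go [] k v hk]
  rfl

theorem pv_rep_match (k v t : List Char) (hk : k ≠ []) :
    PySem.Chars.replace (k ++ t) k v = v ++ PySem.Chars.replace t k v := by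
  rw [pv_rep_go (k ++ t) k v hk, pv_rep_go t k v hk]
  obtain ⟨c, k', rfl⟩ : ∃ c k', k = c :: k' := by
    cases k with
    | nil => exact absurd rfl hk
    | cons c k' => exact ⟨c, k', rfl⟩
  have hlen : ((c :: k') ++ t).length = (k'.length + t.length) + 1 := by simp
  rw [show ((c :: k') ++ t) = c :: (k' ++ t) from rfl] at hlen ⊢
  rw [hlen, pv_go_succ_cons]
  have hpre : (c :: k').isPrefixOf (c :: (k' ++ t)) = true :=
    List.isPrefixOf_iff_prefix.mpr ⟨t, by simp⟩
  simp only [hpre, if_true]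
  rw [show List.drop (c :: k').length (c :: (k' ++ t)) = t by
    simp]
  rw [pv_go_fuel (c :: k') v hk (k'.length + t.length) t.length t _ (by omega) (le_refl _)]
  rw [pv_go_acc]
  simp

theorem pv_rep_nomatch (k v : List Char) (c : Char) (t : List Char) (hk : k ≠ [])
    (h : ¬ k <+: c :: t) :
    PySem.Chars.replace (c :: t) k v = c :: PySem.Chars.replace t k v := by
  rw [pv_rep_go (c :: t) k v hk, pv_rep_go t k v hk]
  rw [show (c :: t).length = t.length + 1 from rfl, pv_go_succ_cons]
  have hpre : k.isPrefixOf (c :: t) = false := by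
    rw [← Bool.not_eq_true, List.isPrefixOf_iff_prefix]; exact h
  simp only [hpre, Bool.false_eq_true, if_false]
  rw [pv_go_acc]
  simp

theorem pv_rep_passthru (k v : List Char) (hk : k ≠ []) :
    ∀ (a : List Char), pvInc a k →
      ∀ x, PySem.Chars.replace (a ++ x) k v = a ++ PySem.Chars.replace x k v := by
  intro a
  induction a with
  | nil => intro _ x; simp
  | cons c a' ih =>
    intro hbar x
    have h0 := hbar 0 (by simp)
    simp only [List.drop_zero] at h0
    have hnp : ¬ k <+: (c :: a') ++ x := by
      intro hp
      rcases List.prefix_or_prefix_of_prefix hp (List.prefix_append (c :: a') x) with h | h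
      · exact h0.1 h
      · exact h0.2 h
    rw [show (c :: a') ++ x = c :: (a' ++ x) by simp] at hnp ⊢
    rw [pv_rep_nomatch k v c (a' ++ x) hk hnp]
    rw [ih (fun p hp => by
      have := hbar (p + 1) (by simpa using Nat.succ_lt_succ hp)
      simpa using this) x]
    simp

theorem pv_pull (k v u₀ : List Char) (hk : k ≠ []) (hH : pvInc u₀ v) :
    ∀ (n : Nat) (t : List Char) (p : Nat), t.length ≤ n →
      List.drop p u₀ <+: PySem.Chars.replace t k v → List.drop p u₀ <+: t := by
  intro n
  induction n with
  | zero =>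
    intro t p h1 h2
    have : t = [] := List.eq_nil_of_length_eq_zero (Nat.le_zero.mp h1)
    subst this
    rwa [pv_rep_nil k v hk] at h2
  | succ m ih =>
    intro t p h1 h2
    by_cases hp : u₀.length ≤ p
    · rw [List.drop_eq_nil_of_le hp]
      exact List.nil_prefix
    rw [not_le] at hp
    cases t with
    | nil => rwa [pv_rep_nil k v hk] at h2
    | cons c t' =>
      by_cases hkp : k <+: c :: t'
      · obtain ⟨t₂, ht₂⟩ := hkp
        rw [← ht₂] at h2 ⊢
        rw [pv_rep_match k v t₂ hk] at h2
        exfalso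
        rcases List.prefix_or_prefix_of_prefix h2
          (List.prefix_append v (PySem.Chars.replace t₂ k v)) with h | h
        · exact (hH p hp).2 h
        · exact (hH p hp).1 h
      · rw [pv_rep_nomatch k v c t' hk hkp] at h2
        rw [List.drop_eq_getElem_cons hp] at h2 ⊢
        rw [List.cons_prefix_cons] at h2 ⊢
        refine ⟨h2.1, ?_⟩
        exact ih t' (p + 1) (by simpa using h1) h2.2

theorem pv_seqrep_nil (P : List (List Char × List Char)) (Hne : ∀ kv ∈ P, kv.1 ≠ []) :
    pvSeqRep P [] = [] := by
  induction P with
  | nil => rfl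
  | cons kv P' ih =>
    show pvSeqRep P' (PySem.Chars.replace [] kv.1 kv.2) = []
    rw [pv_rep_nil kv.1 kv.2 (Hne kv (by simp))]
    exact ih (fun a ha => Hne a (List.mem_cons_of_mem _ ha))

theorem pv_seqrep_passthru (P : List (List Char × List Char)) (a : List Char)
    (h : ∀ kv ∈ P, kv.1 ≠ [] ∧ pvInc a kv.1) :
    ∀ x, pvSeqRep P (a ++ x) = a ++ pvSeqRep P x := by
  induction P generalizing a with
  | nil => intro x; rfl
  | cons kv P' ih =>
    intro x
    have h0 := h kv (by simp)
    show pvSeqRep P' (PySem.Chars.replace (a ++ x) kv.1 kv.2) = a ++ pvSeqRep P' (PySem.Chars.replace x kv.1 kv.2)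
    rw [pv_rep_passthru kv.1 kv.2 h0.1 a h0.2 x]
    exact ih a (fun b hb => h b (List.mem_cons_of_mem _ hb)) _

theorem pv_seqrep_nomatch (P : List (List Char × List Char))
    (Hne : ∀ kv ∈ P, kv.1 ≠ [])
    (Hkv : ∀ kv ∈ P, ∀ kv' ∈ P, pvInc kv.1 kv'.2) :
    ∀ (c : Char) (t : List Char), (∀ kv ∈ P, ¬ kv.1 <+: c :: t) →
      pvSeqRep P (c :: t) = c :: pvSeqRep P t := by
  induction P with
  | nil => intro c t _; rfl
  | cons kv P' ih =>
    intro c t hnm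
    have hne0 : kv.1 ≠ [] := Hne kv (by simp)
    show pvSeqRep P' (PySem.Chars.replace (c :: t) kv.1 kv.2)
      = c :: pvSeqRep P' (PySem.Chars.replace t kv.1 kv.2)
    rw [pv_rep_nomatch kv.1 kv.2 c t hne0 (hnm kv (by simp))]
    apply ih
      (fun a ha => Hne a (List.mem_cons_of_mem _ ha))
      (fun a ha b hb => Hkv a (List.mem_cons_of_mem _ ha) b (List.mem_cons_of_mem _ hb))
    intro kv' hm hpre
    have hne' : kv'.1 ≠ [] := Hne kv' (List.mem_cons_of_mem _ hm)
    obtain ⟨d, u', hu⟩ : ∃ d u', kv'.1 = d :: u' := by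
      cases h : kv'.1 with
      | nil => exact absurd h hne'
      | cons d u' => exact ⟨d, u', rfl⟩
    rw [hu, List.cons_prefix_cons] at hpre
    have hdrop1 : List.drop 1 kv'.1 = u' := by rw [hu]; rfl
    have hpull : List.drop 1 kv'.1 <+: t := by
      apply pv_pull kv.1 kv.2 kv'.1 hne0
        (Hkv kv' (List.mem_cons_of_mem _ hm) kv (by simp)) t.length t 1 (le_refl _)
      rw [hdrop1]; exact hpre.2
    apply hnm kv' (List.mem_cons_of_mem _ hm)
    rw [hu, List.cons_prefix_cons]
    exact ⟨hpre.1, by rwa [hdrop1] at hpull⟩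

theorem pv_try_none (P : List (List Char × List Char)) (s : List Char)
    (h : pvTry P s = none) : ∀ kv ∈ P, ¬ kv.1 <+: s := by
  induction P with
  | nil => intro kv hm; simp at hm
  | cons kv₀ P' ih =>
    intro kv hm
    obtain ⟨k, v⟩ := kv₀
    rw [pvTry] at h
    by_cases hp : k.isPrefixOf s
    · simp [hp] at h
    · simp only [hp, Bool.false_eq_true, if_false] at h
      rcases List.mem_cons.mp hm with rfl | hm'
      · simpa [List.isPrefixOf_iff_prefix] using hp
      · exact ih h kv hm'

theorem pv_try_some (P : List (List Char × List Char)) (s : List Char)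
    (v₀ rest : List Char) (h : pvTry P s = some (v₀, rest)) :
    ∃ P₁ k₀ P₂, P = P₁ ++ (k₀, v₀) :: P₂ ∧ k₀ <+: s ∧ rest = List.drop k₀.length s ∧
      ∀ kv ∈ P₁, ¬ kv.1 <+: s := by
  induction P with
  | nil => simp [pvTry] at h
  | cons kv₀ P' ih =>
    obtain ⟨k, v⟩ := kv₀
    rw [pvTry] at h
    by_cases hp : k.isPrefixOf s
    · simp only [hp, if_true, Option.some.injEq, Prod.mk.injEq] at h
      exact ⟨[], k, P', by simp [h.1], List.isPrefixOf_iff_prefix.mp hp, h.2.symm,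
        by intro kv hm; simp at hm⟩
    · simp only [hp, Bool.false_eq_true, if_false] at h
      obtain ⟨P₁, k₀, P₂, hP, hpre, hrest, hnm⟩ := ih h
      refine ⟨(k, v) :: P₁, k₀, P₂, by simp [hP], hpre, hrest, ?_⟩
      intro kv hm
      rcases List.mem_cons.mp hm with rfl | hm'
      · simpa [List.isPrefixOf_iff_prefix] using hp
      · exact hnm kv hm'

theorem pv_scan_fuel (P : List (List Char × List Char)) (Hne : ∀ kv ∈ P, kv.1 ≠ []) :
    ∀ (f₁ f₂ : Nat) (s : List Char), s.length ≤ f₁ → s.length ≤ f₂ →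
      pvScan P f₁ s = pvScan P f₂ s := by
  intro f₁
  induction f₁ with
  | zero =>
    intro f₂ s h1 _
    have : s = [] := List.eq_nil_of_length_eq_zero (Nat.le_zero.mp h1)
    subst this
    cases f₂ <;> rfl
  | succ n ih =>
    intro f₂ s h1 h2
    cases s with
    | nil => cases f₂ <;> rfl
    | cons c t =>
      obtain ⟨m, rfl⟩ : ∃ m, f₂ = m + 1 := by
        cases f₂ with
        | zero => simp at h2
        | succ m => exact ⟨m, rfl⟩
      rw [pvScan, pvScan]
      cases htry : pvTry P (c :: t) with
      | none =>
        rw [ih m t (by simpa using h1) (by simpa using h2)]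
      | some pr =>
        obtain ⟨v₀, rest⟩ := pr
        obtain ⟨P₁, k₀, P₂, hP, hpre, hrest, _⟩ := pv_try_some P (c :: t) v₀ rest htry
        have hk₀ : k₀ ≠ [] := Hne (k₀, v₀) (by rw [hP]; simp)
        have hk₀len : 1 ≤ k₀.length := by
          cases k₀ with
          | nil => exact absurd rfl hk₀
          | cons _ _ => simp
        have hrl : rest.length ≤ t.length := by
          rw [hrest, List.length_drop]
          simp only [List.length_cons]
          omega
        simp only [List.length_cons] at h1 h2
        show v₀ ++ pvScan P n rest = v₀ ++ pvScan P m rest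
        rw [ih m rest (by omega) (by omega)]

theorem pv_seqrep_eq_scan (P : List (List Char × List Char))
    (Hne : ∀ kv ∈ P, kv.1 ≠ [])
    (Hkk : ∀ kv ∈ P, ∀ kv' ∈ P, kv.1 ≠ kv'.1 → pvInc kv.1 kv'.1)
    (Hvk : ∀ kv ∈ P, ∀ kv' ∈ P, pvInc kv.2 kv'.1)
    (Hkv : ∀ kv ∈ P, ∀ kv' ∈ P, pvInc kv.1 kv'.2) :
    ∀ (n : Nat) (s : List Char), s.length ≤ n → pvSeqRep P s = pvScan P s.length s := by
  intro n
  induction n with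
  | zero =>
    intro s h1
    have : s = [] := List.eq_nil_of_length_eq_zero (Nat.le_zero.mp h1)
    subst this
    rw [pv_seqrep_nil P Hne]; rfl
  | succ m ih =>
    intro s h1
    cases s with
    | nil => rw [pv_seqrep_nil P Hne]; rfl
    | cons c t =>
      cases htry : pvTry P (c :: t) with
      | none =>
        have hnm := pv_try_none P (c :: t) htry
        rw [pv_seqrep_nomatch P Hne Hkv c t hnm]
        rw [show (c :: t).length = t.length + 1 from rfl, pvScan]
        simp only [htry]
        rw [ih t (by simpa using h1)]
      | some pr =>
        obtain ⟨v₀, rest⟩ := pr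
        obtain ⟨P₁, k₀, P₂, hP, hpre, hrest, hnm₁⟩ := pv_try_some P (c :: t) v₀ rest htry
        obtain ⟨t₀, ht₀⟩ := hpre
        have hrest' : rest = t₀ := by rw [hrest, ← ht₀, List.drop_left]
        have hk₀ : k₀ ≠ [] := Hne (k₀, v₀) (by rw [hP]; simp)
        have hk₀len : 1 ≤ k₀.length := by
          cases k₀ with
          | nil => exact absurd rfl hk₀
          | cons _ _ => simp
        have hmem : (k₀, v₀) ∈ P := by rw [hP]; simp
        -- left side
        have hL : pvSeqRep P (c :: t) = v₀ ++ pvSeqRep P t₀ := by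
          rw [← ht₀, hP]
          rw [pvSeqRep, List.foldl_append, List.foldl_cons]
          rw [show ∀ y, List.foldl (fun out kv => PySem.Chars.replace out kv.1 kv.2) y P₁
              = pvSeqRep P₁ y from fun _ => rfl]
          rw [pv_seqrep_passthru P₁ k₀ (fun kv hm => by
            refine ⟨Hne kv (by rw [hP]; simp [List.mem_append.mpr (Or.inl hm)]), ?_⟩
            have hne : k₀ ≠ kv.1 := by
              intro he
              exact hnm₁ kv hm (he ▸ ⟨t₀, ht₀⟩)
            exact Hkk (k₀, v₀) hmem kv (by rw [hP]; simp [List.mem_append.mpr (Or.inl hm)])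
              hne) t₀]
          rw [pv_rep_match k₀ v₀ _ hk₀]
          rw [show ∀ y, List.foldl (fun out kv => PySem.Chars.replace out kv.1 kv.2) y P₂
              = pvSeqRep P₂ y from fun _ => rfl]
          rw [pv_seqrep_passthru P₂ v₀ (fun kv hm => by
            refine ⟨Hne kv (by rw [hP]; simp [hm]), ?_⟩
            exact Hvk (k₀, v₀) hmem kv (by rw [hP]; simp [hm])) _]
          congr 1
          conv_rhs => rw [pvSeqRep, List.foldl_append, List.foldl_cons]
          rfl
        rw [hL]
        -- right side
        rw [show (c :: t).length = t.length + 1 from rfl, pvScan]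
        simp only [htry]
        have ht₀len : t₀.length ≤ t.length := by
          have : (c :: t).length = k₀.length + t₀.length := by rw [← ht₀]; simp
          simp only [List.length_cons] at this
          omega
        rw [hrest']
        rw [pv_scan_fuel P Hne t.length t₀.length t₀ ht₀len (le_refl _)]
        rw [ih t₀ (by simp only [List.length_cons] at h1; omega)]

-- the table's concrete incomparability facts, checked by decide on the literals
theorem pvPairs_ne : ∀ kv ∈ pvPairs, kv.1 ≠ [] := by decide

theorem pvPairs_kk : ∀ kv ∈ pvPairs, ∀ kv' ∈ pvPairs, kv.1 ≠ kv'.1 → pvInc kv.1 kv'.1 := by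
  have hb : (pvPairs.all fun a => pvPairs.all fun b => (a.1 == b.1) || pvIncB a.1 b.1) = true := by
    decide
  intro kv hm kv' hm' hne
  have h1 := (List.all_eq_true.mp hb) kv hm
  have h2 := (List.all_eq_true.mp h1) kv' hm'
  rcases Bool.or_eq_true_iff.mp h2 with h | h
  · exact absurd (by simpa using h) hne
  · exact pvIncB_sound h

theorem pvPairs_vk : ∀ kv ∈ pvPairs, ∀ kv' ∈ pvPairs, pvInc kv.2 kv'.1 := by
  have hb : (pvPairs.all fun a => pvPairs.all fun b => pvIncB a.2 b.1) = true := by decide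
  intro kv hm kv' hm'
  exact pvIncB_sound ((List.all_eq_true.mp ((List.all_eq_true.mp hb) kv hm)) kv' hm')

theorem pvPairs_kv : ∀ kv ∈ pvPairs, ∀ kv' ∈ pvPairs, pvInc kv.1 kv'.2 := by
  have hb : (pvPairs.all fun a => pvPairs.all fun b => pvIncB a.1 b.2) = true := by decide
  intro kv hm kv' hm'
  exact pvIncB_sound ((List.all_eq_true.mp ((List.all_eq_true.mp hb) kv hm)) kv' hm')

-- A's fold over the dict, pushed down to the char-list level
theorem pv_A_toList (h : String) :
    (style_replace h).toList = pvSeqRep pvPairs h.toList := by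
  have hkeys : pvDictA.keys =
      ["--jp-content-heading-font-weight: 500;", "--jp-content-font-size1: 14px;",
       "--jp-content-font-size3: 1.44em;", "--jp-content-font-size4: 1.728em;",
       "--jp-content-font-size5: 2.0736em;"] := by decide
  have g1 : pvDictA.getD "--jp-content-heading-font-weight: 500;" ""
      = "--jp-content-heading-font-weight: bold;" := by decide
  have g2 : pvDictA.getD "--jp-content-font-size1: 14px;" ""
      = "--jp-content-font-size1: 13px;" := by decide
  have g3 : pvDictA.getD "--jp-content-font-size3: 1.44em;" ""
      = "--jp-content-font-size3: 13px;" := by decide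
  have g4 : pvDictA.getD "--jp-content-font-size4: 1.728em;" ""
      = "--jp-content-font-size4: 14px;" := by decide
  have g5 : pvDictA.getD "--jp-content-font-size5: 2.0736em;" ""
      = "--jp-content-font-size5: 18px;" := by decide
  rw [style_replace, hkeys]
  simp only [List.foldl_cons, List.foldl_nil, g1, g2, g3, g4, g5]
  simp only [pvSeqRep, pvPairs, List.foldl_cons, List.foldl_nil]
  simp only [PySem.Str.toList_replace]

-- ===== VERDICT (by name: the statement is the Claim_ definition above) =====
theorem style_replace_spec : Claim_equal_style_replace := by
  intro htmlfile _
  unfold Spec_style_replace style_replace_alt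
  refine (String.ofList_eq.mpr ?_).symm
  rw [pv_A_toList htmlfile]
  exact (pv_seqrep_eq_scan pvPairs pvPairs_ne pvPairs_kk pvPairs_vk pvPairs_kv
    htmlfile.toList.length htmlfile.toList (le_refl _)).symm
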